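-- pv_equiv track=rewrite | github.com/9999years/extendedformatter | extendedformatter/formatter.py | get_specs
-- ===== SOURCE A (Python) =====
-- def get_specs(field):
--     """
--     takes a format string, returns stripped field, conversion spec, and
--     format spec
--     only a 2-tuple of field and conversion for now
--     use format(...) for formatting
--     """
--
--     field = field.strip()
--
--     # if the very last character is ! it's not a conversion spec
--     if '!' in field and field[-1] != '!':
--         # possible conversion spec
--         for i, c in enumerate(reversed(field)):
--             cp = ord(c)
--             # must be within a-z or A-Z or 0-9
--             if cp == 0x21: #!
--                 # ! followed by valid alphanumer sequence
--                 inx = len(field) - i - 1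
--                 # + 1 to cut out `!`
--                 return field[:inx], field[inx + 1:]
--             elif not (
--                     (0x30 <= cp <= 0x39) or
--                     (0x41 <= cp <= 0x5a) or
--                     (0x61 <= cp <= 0x7a)
--                 ):
--                 # invalid
--                 break
--     return field, ''
-- ===== SOURCE B (Python) =====
-- def get_specs(field):
--     field = field.strip()
--     head, sep, tail = field.rpartition('!')
--     if sep and tail and tail.isascii() and tail.isalnum():
--         return head, tail
--     return field, ''
-- ===== Notes on version B (the rewrite author's own statement) =====
-- stated objective: simpler
-- what changed: Replaces the backward character-by-character scan with ord-range tests by a single rpartition('!') on the last '!' plus an isalnum check of the tail.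
import Mathlib
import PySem

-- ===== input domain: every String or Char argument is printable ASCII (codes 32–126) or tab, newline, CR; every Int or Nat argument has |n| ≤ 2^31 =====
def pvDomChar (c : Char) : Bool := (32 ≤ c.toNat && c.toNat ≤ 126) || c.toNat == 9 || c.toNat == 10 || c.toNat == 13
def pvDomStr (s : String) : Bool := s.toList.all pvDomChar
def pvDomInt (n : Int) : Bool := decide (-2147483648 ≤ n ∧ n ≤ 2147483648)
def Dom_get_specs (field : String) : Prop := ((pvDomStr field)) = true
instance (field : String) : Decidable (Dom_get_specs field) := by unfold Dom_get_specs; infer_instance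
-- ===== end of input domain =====

-- B replaces A's backward character scan by rpartition on the last '!' plus an isalnum test of the tail (simpler, same cost).

-- ===== PORT A =====
-- A's for-loop over enumerate(reversed(field)) with its two early exits (return at '!', break at non-alphanumeric)
def get_specs_loop (f : List Char) : List (Int × Char) → Option (List Char × List Char)
  | [] => none
  | (i, c) :: rest =>
      let cp := c.toNat
      if cp = 0x21 then
        let inx : Int := (PySem.Chars.len f : Int) - i - 1
        some (PySem.List.slice f none (some inx), PySem.List.slice f (some (inx + 1)) none)
      else if ¬ ((0x30 ≤ cp ∧ cp ≤ 0x39) ∨ (0x41 ≤ cp ∧ cp ≤ 0x5a) ∨ (0x61 ≤ cp ∧ cp ≤ 0x7a)) then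
        none
      else get_specs_loop f rest


def get_specs (field : String) : String × String :=
  let f := (PySem.Str.strip field).toList
  -- field[-1] is only evaluated when '!' in field, so f is nonempty there; the pyGetD default is never read
  if PySem.Chars.isIn ['!'] f && !(PySem.List.pyGetD f (-1) ' ' == '!') then
    match get_specs_loop f (PySem.List.enumerate f.reverse 0) with
    | some (a, b) => (String.ofList a, String.ofList b)
    | none => (String.ofList f, "")
  else (String.ofList f, "")

-- ===== PORT B =====
def get_specs_alt (field : String) : String × String :=
  let f := (PySem.Str.strip field).toList
  -- field.rpartition('!') ported by hand, exactly CPython's rule: rfind, then the three slices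
  let i := PySem.Chars.rfind f ['!']
  let hst :=
    if i = -1 then (([] : List Char), ([] : List Char), f)
    else (PySem.List.slice f none (some i), PySem.List.slice f (some i) (some (i + 1)),
          PySem.List.slice f (some (i + 1)) none)
  -- tail.isascii() is identically true on Dom (ASCII inputs); tail.isalnum() on ASCII is Chars.strIsalnum
  if hst.2.1 ≠ [] ∧ hst.2.2 ≠ [] ∧ PySem.Chars.strIsalnum hst.2.2 = true then
    (String.ofList hst.1, String.ofList hst.2.2)
  else (String.ofList f, "")

-- ===== PRECONDITION & SPEC =====
def Spec_get_specs (field : String) (out : String × String) : Prop := out = get_specs_alt field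
instance (field : String) (out : String × String) : Decidable (Spec_get_specs field out) := by unfold Spec_get_specs; infer_instance

-- ===== CLAIM (what is proved, stated in full; the proofs are below) =====
def Claim_equal_get_specs : Prop := ∀ (field : String), Dom_get_specs field → Spec_get_specs field (get_specs field)

-- ===== LEMMAS AND PROOFS =====

theorem alnum_iff (c : Char) :
    ((0x30 ≤ c.toNat ∧ c.toNat ≤ 0x39) ∨ (0x41 ≤ c.toNat ∧ c.toNat ≤ 0x5a) ∨
      (0x61 ≤ c.toNat ∧ c.toNat ≤ 0x7a)) ↔ PySem.Chars.isalnum c = true := by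
  simp only [PySem.Chars.isalnum, PySem.Chars.isalpha, PySem.Chars.isdigit, PySem.Chars.isupper,
    PySem.Chars.islower, Bool.or_eq_true, Bool.and_eq_true, decide_eq_true_eq, Char.le_def,
    UInt32.le_iff_toNat_le, show 'A'.val.toNat = 65 from rfl, show 'Z'.val.toNat = 90 from rfl,
    show 'a'.val.toNat = 97 from rfl, show 'z'.val.toNat = 122 from rfl,
    show '0'.val.toNat = 48 from rfl, show '9'.val.toNat = 57 from rfl]
  have hc : c.toNat = c.val.toNat := rfl
  omega

theorem char_bang (c : Char) (h : c.toNat = 0x21) : c = '!' := by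
  apply Char.ext; apply UInt32.toNat_inj.mp; exact h

theorem go_none (s : List Char) (hs : '!' ∉ s) :
    ∀ j, PySem.Chars.rfind.go s ['!'] j = -1 := by
  intro j
  induction j with
  | zero =>
    have hnp : ¬ (['!'].isPrefixOf s = true) := fun hpref =>
      hs ((List.isPrefixOf_iff_prefix.mp hpref).mem (by simp))
    simp only [PySem.Chars.rfind.go]
    rw [if_neg hnp]
  | succ j ih =>
    have hnp : ¬ (['!'].isPrefixOf (s.drop (j + 1)) = true) := fun hpref =>
      hs (List.mem_of_mem_drop ((List.isPrefixOf_iff_prefix.mp hpref).mem (by simp)))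
    simp only [PySem.Chars.rfind.go]
    rw [if_neg hnp, ih]

theorem go_last (u v : List Char) (hv : '!' ∉ v) :
    ∀ j, u.length ≤ j → PySem.Chars.rfind.go (u ++ '!' :: v) ['!'] j = u.length := by
  intro j
  induction j with
  | zero =>
    intro hj
    have hu : u = [] := List.eq_nil_of_length_eq_zero (by omega)
    subst hu
    simp [PySem.Chars.rfind.go, List.isPrefixOf]
  | succ j ih =>
    intro hj
    by_cases he : u.length = j + 1
    · simp only [PySem.Chars.rfind.go]
      rw [← he, List.drop_left, if_pos (by simp [List.isPrefixOf]), he]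
    · have hlt : u.length ≤ j := by omega
      have hnp : ¬ (['!'].isPrefixOf (List.drop (j + 1) (u ++ '!' :: v)) = true) := by
        intro hpref
        have hm : '!' ∈ List.drop (j + 1) (u ++ '!' :: v) :=
          (List.isPrefixOf_iff_prefix.mp hpref).mem (by simp)
        rw [List.drop_append] at hm
        obtain ⟨m, hmm⟩ : ∃ m, j + 1 - u.length = m + 1 := ⟨j - u.length, by omega⟩
        rw [List.drop_eq_nil_of_le (by omega), hmm, List.drop_succ_cons] at hm
        exact hv (List.mem_of_mem_drop (by simpa using hm))
      simp only [PySem.Chars.rfind.go]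
      rw [if_neg hnp, ih hlt]

theorem loop_spec (f rest : List Char) :
    ∀ (t : List Char) (k : Int), '!' ∉ t →
    get_specs_loop f (PySem.List.enumerate (t ++ '!' :: rest) k) =
      (if t.all PySem.Chars.isalnum then
        some (PySem.List.slice f none (some ((PySem.Chars.len f : Int) - (k + t.length) - 1)),
              PySem.List.slice f (some ((PySem.Chars.len f : Int) - (k + t.length) - 1 + 1)) none)
      else none) := by
  intro t
  induction t with
  | nil =>
    intro k _
    rw [List.nil_append, PySem.List.enumerate_cons]
    simp [get_specs_loop, show ('!').toNat = 0x21 from rfl]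
  | cons c t' ih =>
    intro k hmem
    have hcb : c ≠ '!' := fun h => hmem (h ▸ List.mem_cons_self ..)
    have hcn : ¬ (c.toNat = 0x21) := fun h => hcb (char_bang c h)
    rw [List.cons_append, PySem.List.enumerate_cons]
    by_cases ha : PySem.Chars.isalnum c = true
    · have har := (alnum_iff c).mpr ha
      simp only [get_specs_loop, if_neg hcn, if_neg (not_not_intro har)]
      rw [ih (k + 1) (fun h => hmem (List.mem_cons_of_mem _ h))]
      have harith : k + 1 + (t'.length : Int) = k + ((c :: t').length : Int) := by
        simp [List.length_cons]; ring
      rw [harith]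
      simp [List.all_cons, ha]
    · have har : ¬ ((0x30 ≤ c.toNat ∧ c.toNat ≤ 0x39) ∨ (0x41 ≤ c.toNat ∧ c.toNat ≤ 0x5a) ∨
          (0x61 ≤ c.toNat ∧ c.toNat ≤ 0x7a)) := fun h => ha ((alnum_iff c).mp h)
      simp only [get_specs_loop, if_neg hcn, if_pos (not_not_intro har |> fun h => har)]
      simp [List.all_cons, ha]

theorem isIn_bang (f : List Char) : PySem.Chars.isIn ['!'] f = true ↔ '!' ∈ f := by
  rw [PySem.Chars.isIn_iff_infix]
  constructor
  · intro h; exact h.mem (by simp)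
  · intro h
    obtain ⟨s, t, rfl⟩ := List.append_of_mem h
    exact ⟨s, t, by simp⟩

theorem last_bang_decomp (f : List Char) (hmem : '!' ∈ f) :
    ∃ u v, f = u ++ '!' :: v ∧ '!' ∉ v := by
  have htd : f.reverse.takeWhile (fun c => c != '!') ++ f.reverse.dropWhile (fun c => c != '!')
      = f.reverse := List.takeWhile_append_dropWhile
  set t := f.reverse.takeWhile (fun c => c != '!') with ht
  set d := f.reverse.dropWhile (fun c => c != '!') with hdd
  have hd : d ≠ [] := by
    intro h
    have h1 : f.reverse = t := by rw [← htd, h, List.append_nil]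
    have h2 : '!' ∈ t := h1 ▸ List.mem_reverse.mpr hmem
    have := List.mem_takeWhile_imp h2
    simp at this
  obtain ⟨x, dt, hdc⟩ := List.exists_cons_of_ne_nil hd
  have hx : x = '!' := by
    have h1 := List.head_dropWhile_not (fun c => c != '!') hd
    have h2 : List.dropWhile (fun c => c != '!') f.reverse = x :: dt := hdd.symm.trans hdc
    simp only [h2, List.head_cons] at h1
    simpa using h1
  subst hx
  refine ⟨dt.reverse, t.reverse, ?_, ?_⟩
  · conv_lhs => rw [← List.reverse_reverse f, ← htd, hdc]
    simp
  · intro h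
    have := List.mem_takeWhile_imp (List.mem_reverse.mp h)
    simp at this

theorem main_lemma (f : List Char) :
    (if PySem.Chars.isIn ['!'] f && !(PySem.List.pyGetD f (-1) ' ' == '!') then
       match get_specs_loop f (PySem.List.enumerate f.reverse 0) with
       | some (a, b) => (String.ofList a, String.ofList b)
       | none => (String.ofList f, "")
     else (String.ofList f, "")) =
    (if (if PySem.Chars.rfind f ['!'] = -1 then (([] : List Char), ([] : List Char), f)
         else (PySem.List.slice f none (some (PySem.Chars.rfind f ['!'])),
               PySem.List.slice f (some (PySem.Chars.rfind f ['!'])) (some (PySem.Chars.rfind f ['!'] + 1)),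
               PySem.List.slice f (some (PySem.Chars.rfind f ['!'] + 1)) none)).2.1 ≠ [] ∧
        (if PySem.Chars.rfind f ['!'] = -1 then (([] : List Char), ([] : List Char), f)
         else (PySem.List.slice f none (some (PySem.Chars.rfind f ['!'])),
               PySem.List.slice f (some (PySem.Chars.rfind f ['!'])) (some (PySem.Chars.rfind f ['!'] + 1)),
               PySem.List.slice f (some (PySem.Chars.rfind f ['!'] + 1)) none)).2.2 ≠ [] ∧
        PySem.Chars.strIsalnum
          ((if PySem.Chars.rfind f ['!'] = -1 then (([] : List Char), ([] : List Char), f)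
            else (PySem.List.slice f none (some (PySem.Chars.rfind f ['!'])),
                  PySem.List.slice f (some (PySem.Chars.rfind f ['!'])) (some (PySem.Chars.rfind f ['!'] + 1)),
                  PySem.List.slice f (some (PySem.Chars.rfind f ['!'] + 1)) none)).2.2) = true then
       (String.ofList
          ((if PySem.Chars.rfind f ['!'] = -1 then (([] : List Char), ([] : List Char), f)
            else (PySem.List.slice f none (some (PySem.Chars.rfind f ['!'])),
                  PySem.List.slice f (some (PySem.Chars.rfind f ['!'])) (some (PySem.Chars.rfind f ['!'] + 1)),
                  PySem.List.slice f (some (PySem.Chars.rfind f ['!'] + 1)) none)).1),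
        String.ofList
          ((if PySem.Chars.rfind f ['!'] = -1 then (([] : List Char), ([] : List Char), f)
            else (PySem.List.slice f none (some (PySem.Chars.rfind f ['!'])),
                  PySem.List.slice f (some (PySem.Chars.rfind f ['!'])) (some (PySem.Chars.rfind f ['!'] + 1)),
                  PySem.List.slice f (some (PySem.Chars.rfind f ['!'] + 1)) none)).2.2))
     else (String.ofList f, "")) := by
  by_cases hmem : '!' ∈ f
  · obtain ⟨u, v, hf, hvn⟩ := last_bang_decomp f hmem
    have hisin : PySem.Chars.isIn ['!'] f = true := (isIn_bang f).mpr hmem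
    have hrf : PySem.Chars.rfind f ['!'] = (u.length : Int) := by
      unfold PySem.Chars.rfind
      rw [hf]
      exact go_last u v hvn _ (by simp)
    have hne : ¬ ((u.length : Int) = -1) := by omega
    have hrev : f.reverse = v.reverse ++ '!' :: u.reverse := by
      rw [hf]; simp
    have hvrn : '!' ∉ v.reverse := fun h => hvn (List.mem_reverse.mp h)
    have hloop := loop_spec f u.reverse v.reverse 0 hvrn
    rw [← hrev] at hloop
    have hE : (PySem.Chars.len f : Int) - (0 + (v.reverse.length : Int)) - 1 = (u.length : Int) := by
      rw [PySem.Chars.len_eq, hf]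
      simp [List.length_append]
      omega
    rw [hE] at hloop
    have htake : PySem.List.slice f none (some (u.length : Int)) = u := by
      rw [PySem.List.slice_to_natCast, hf, List.take_left]
    have hdrop : PySem.List.slice f (some ((u.length : Int) + 1)) none = v := by
      have h1 : ((u.length : Int) + 1) = ((u.length + 1 : Nat) : Int) := by push_cast; ring
      rw [h1, PySem.List.slice_from_natCast, hf, List.drop_append,
        List.drop_eq_nil_of_le (by omega), Nat.add_sub_cancel_left, List.drop_succ_cons,
        List.drop_zero, List.nil_append]
    have hsep : PySem.List.slice f (some (u.length : Int)) (some ((u.length : Int) + 1)) = ['!'] := by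
      have h1 : ((u.length : Int) + 1) = ((u.length : Int) + ((1 : Nat) : Int)) := by push_cast; ring
      rw [h1, PySem.List.slice_natCast_add, hf, List.drop_left]
      rfl
    rcases List.eq_nil_or_concat v with hv0 | ⟨v', z, hvz⟩
    · -- f ends with '!': A's guard is false, B's tail is empty
      subst hv0
      have hlast : PySem.List.pyGetD f (-1) ' ' = '!' := by
        rw [hf]; exact PySem.List.pyGetD_neg_one_append_singleton ..
      simp only [hrf, if_neg hne, hisin, hlast, hdrop]
      simp
    · have hzmem : z ∈ v := by rw [hvz]; simp
      have hz : z ≠ '!' := fun h => hvn (h ▸ hzmem)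
      have hlast : PySem.List.pyGetD f (-1) ' ' = z := by
        have hf2 : f = (u ++ '!' :: v') ++ [z] := by rw [hf, hvz]; simp
        rw [hf2]; exact PySem.List.pyGetD_neg_one_append_singleton ..
      have hguard : (PySem.Chars.isIn ['!'] f && !(PySem.List.pyGetD f (-1) ' ' == '!')) = true := by
        rw [hisin, hlast]; simp [hz]
      have hvne : v ≠ [] := by rw [hvz]; simp
      by_cases hall : v.all PySem.Chars.isalnum = true
      · have hallr : v.reverse.all PySem.Chars.isalnum = true := by
          rw [List.all_reverse]; exact hall
        simp only [hrf, if_neg hne, hguard, hloop, hallr, htake, hdrop, hsep]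
        have hisal : PySem.Chars.strIsalnum v = true := by
          simp [PySem.Chars.strIsalnum, hall, hvne]
        simp [hisal, hvne]
      · have hallr : ¬ v.reverse.all PySem.Chars.isalnum = true := by
          rw [List.all_reverse]; exact hall
        simp only [hrf, if_neg hne, hguard, hloop, if_neg hallr, htake, hdrop, hsep]
        have hisal : ¬ PySem.Chars.strIsalnum v = true := by
          simp [PySem.Chars.strIsalnum, hvne]
          simpa using hall
        simp [hisal]
  · have h1 : PySem.Chars.isIn ['!'] f = false := by
      rw [Bool.eq_false_iff]
      exact fun h => hmem ((isIn_bang f).mp h)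
    have hrf : PySem.Chars.rfind f ['!'] = -1 := go_none f hmem _
    simp [h1, hrf]

-- ===== VERDICT (by name: the statement is the Claim_ definition above) =====
theorem get_specs_spec : Claim_equal_get_specs := by
  intro field _
  unfold Spec_get_specs get_specs get_specs_alt
  exact main_lemma ((PySem.Str.strip field).toList)
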